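-- pv_equiv track=rewrite | github.com/ElderMedic/cwltool_prov | cwltool/cwlprov/ro.py | _check_mod_11_2
-- ===== SOURCE A (Python) =====
-- def _check_mod_11_2(numeric_string: str) -> bool:
--     """
--     Validate numeric_string for its MOD-11-2 checksum.
--
--     Any "-" in the numeric_string are ignored.
--
--     The last digit of numeric_string is assumed to be the checksum, 0-9 or X.
--
--     See ISO/IEC 7064:2003 and
--     https://support.orcid.org/knowledgebase/articles/116780-structure-of-the-orcid-identifier
--     """
--     # Strip -
--     nums = numeric_string.replace("-", "")
--     total = 0
--     # skip last (check)digit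
--     for num in nums[:-1]:
--         digit = int(num)
--         total = (total + digit) * 2
--     remainder = total % 11
--     result = (12 - remainder) % 11
--     if result == 10:
--         checkdigit = "X"
--     else:
--         checkdigit = str(result)
--     # Compare against last digit or X
--     return nums[-1].upper() == checkdigit
-- ===== SOURCE B (Python) =====
-- def _check_mod_11_2(numeric_string: str) -> bool:
--     nums = numeric_string.replace("-", "")
--     last = nums[-1]
--     if last in "Xx":
--         check = 10
--     elif last in "0123456789":
--         check = ord(last) - 48
--     else:
--         return False
--     acc = check % 11
--     w = 2
--     for ch in reversed(nums[:-1]):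
--         acc = (acc + w * int(ch)) % 11
--         w = (w * 2) % 11
--     return acc == 1
-- ===== Notes on version B (the rewrite author's own statement) =====
-- stated objective: alternative
-- what changed: B abandons A's forward Horner pass ((total+digit)*2) and check-character reconstruction/string comparison: it first maps the last character to its check value (X/x -> 10, digit -> value, else False), then walks the body BACK-TO-FRONT keeping a running sum and a power-of-two weight both reduced mod 11 at every step, and returns acc == 1 (the ISO 7064 validity congruence).
import Mathlib
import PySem

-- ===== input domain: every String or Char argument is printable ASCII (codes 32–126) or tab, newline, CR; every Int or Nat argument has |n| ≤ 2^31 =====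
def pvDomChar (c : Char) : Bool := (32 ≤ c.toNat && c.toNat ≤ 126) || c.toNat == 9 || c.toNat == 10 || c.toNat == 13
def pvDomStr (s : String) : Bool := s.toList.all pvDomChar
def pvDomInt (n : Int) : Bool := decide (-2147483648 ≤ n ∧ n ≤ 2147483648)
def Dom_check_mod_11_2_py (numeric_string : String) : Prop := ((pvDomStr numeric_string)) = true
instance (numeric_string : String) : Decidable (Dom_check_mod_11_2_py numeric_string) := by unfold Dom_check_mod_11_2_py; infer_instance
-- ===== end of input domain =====

-- B replaces A's forward Horner pass and check-character reconstruction by a back-to-front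
-- walk with mod-11-reduced power-of-two weights and the ISO 7064 validity test acc == 1;
-- objective: alternative (same cost, different traversal and state).


-- ===== PORT A =====
def check_mod_11_2_py (numeric_string : String) : Bool :=
  let nums := PySem.Chars.replace numeric_string.toList ['-'] []
  let total : Int := (PySem.List.slice nums none (some (-1))).foldl
    (fun total num => (total + ((PySem.Int.ofChars? [num]).getD 0)) * 2) 0
  let remainder := PySem.Int.mod total 11
  let result := PySem.Int.mod (12 - remainder) 11
  let checkdigit := if result = 10 then ['X'] else PySem.Int.toChars result
  match PySem.List.pyGet? nums (-1) with
  | some c => PySem.Chars.upper [c] == checkdigit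
  | none => false   -- IndexError on empty: excluded by Pre_

-- ===== PORT B =====
-- the weighted back-to-front loop of Source B: state (acc, w), both kept reduced mod 11
def pvAltLoop (nums : List Char) (check : Int) : Bool :=
  let st := ((PySem.List.slice nums none (some (-1))).reverse).foldl
    (fun (st : Int × Int) ch =>
      (PySem.Int.mod (st.1 + st.2 * ((PySem.Int.ofChars? [ch]).getD 0)) 11,
       PySem.Int.mod (st.2 * 2) 11))
    (PySem.Int.mod check 11, 2)
  st.1 == 1

def check_mod_11_2_py_alt (numeric_string : String) : Bool :=
  let nums := PySem.Chars.replace numeric_string.toList ['-'] []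
  match PySem.List.pyGet? nums (-1) with
  | some last =>
      if last = 'X' ∨ last = 'x' then pvAltLoop nums 10
      else if '0' ≤ last ∧ last ≤ '9' then pvAltLoop nums ((last.toNat : Int) - 48)
      else false
  | none => false   -- IndexError on empty: excluded by Pre_

-- ===== PRECONDITION & SPEC =====
-- Pre_ excludes exactly the inputs where Python A raises: the string with all '-' removed must be
-- nonempty (else nums[-1] raises IndexError) and every character before the last must be an ASCII
-- digit (else int(num) raises ValueError).
def Pre_check_mod_11_2_py (numeric_string : String) : Prop :=
  (numeric_string.toList.filter (fun c => c ≠ '-')) ≠ [] ∧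
  ((numeric_string.toList.filter (fun c => c ≠ '-')).dropLast.all
    (fun c => decide ('0' ≤ c) && decide (c ≤ '9'))) = true
instance (numeric_string : String) : Decidable (Pre_check_mod_11_2_py numeric_string) := by
  unfold Pre_check_mod_11_2_py; infer_instance

def pvWitness_check_mod_11_2_py : String := "0-59X"

def Spec_check_mod_11_2_py (numeric_string : String) (out : Bool) : Prop := out = check_mod_11_2_py_alt numeric_string
instance (numeric_string : String) (out : Bool) : Decidable (Spec_check_mod_11_2_py numeric_string out) := by unfold Spec_check_mod_11_2_py; infer_instance

-- ===== CLAIM (what is proved, stated in full; the proofs are below) =====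
def Claim_equal_check_mod_11_2_py : Prop := ∀ (numeric_string : String), Dom_check_mod_11_2_py numeric_string → Pre_check_mod_11_2_py numeric_string → Spec_check_mod_11_2_py numeric_string (check_mod_11_2_py numeric_string)

-- ===== LEMMAS AND PROOFS =====

-- replace with old = "-" and new = "" is a filter
theorem replace_dash_go (fuel : Nat) (l acc : List Char) (h : l.length ≤ fuel) :
    PySem.Chars.replace.go ['-'] [] fuel l acc = acc.reverse ++ l.filter (fun c => c ≠ '-') := by
  induction fuel generalizing l acc with
  | zero =>
    interval_cases hl : l.length
    · simp at hl; subst hl; simp [PySem.Chars.replace.go]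
  | succ n ih =>
    cases l with
    | nil => simp [PySem.Chars.replace.go]
    | cons c t =>
      simp only [PySem.Chars.replace.go]
      by_cases hc : c = '-'
      · subst hc
        rw [if_pos (by simp [List.isPrefixOf])]
        simpa using ih t acc (by simpa using Nat.le_of_succ_le_succ h)
      · rw [if_neg (by simp [List.isPrefixOf]; exact fun h => hc h.symm)]
        rw [ih t (c :: acc) (by simpa using Nat.le_of_succ_le_succ h)]
        simp [hc]

theorem replace_dash (cs : List Char) :
    PySem.Chars.replace cs ['-'] [] = cs.filter (fun c => c ≠ '-') := by
  simpa [PySem.Chars.replace] using replace_dash_go cs.length cs [] le_rfl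

theorem pyGet?_mem {α : Type} {xs : List α} {i : Int} {a : α}
    (h : PySem.List.pyGet? xs i = some a) : a ∈ xs := by
  unfold PySem.List.pyGet? at h
  cases hk : PySem.List.pyIdx? xs.length i with
  | none => simp [hk] at h
  | some k => simp [hk] at h; exact List.mem_of_getElem? h

-- the little-endian weighted sum Σ l_j * 2^j, as a fold
def pvH (l : List Int) : Int := l.foldr (fun d h => d + 2 * h) 0

-- invariant of B's back-to-front loop: state (a, w) with a already reduced mod 11
theorem altLoop_inv (l : List Int) (a w : Int) (ha : a % 11 = a) :
    (l.foldl (fun (st : Int × Int) d => ((st.1 + st.2 * d) % 11, (st.2 * 2) % 11)) (a, w)).1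
      = (a + w * pvH l) % 11 := by
  induction l generalizing a w with
  | nil => simp [pvH, ha]
  | cons d t ih =>
    simp only [List.foldl_cons]
    rw [ih _ _ (Int.emod_emod_of_dvd _ (dvd_refl 11))]
    have : ((a + w * d) % 11 + (w * 2) % 11 * pvH t) % 11
        = ((a + w * d) + (w * 2) * pvH t) % 11 := by
      conv_rhs => rw [Int.add_emod, Int.mul_emod]
      rw [Int.add_emod ((a + w * d) % 11), Int.mul_emod ((w * 2) % 11)]
      simp [Int.emod_emod_of_dvd]
    rw [this, pvH]
    ring_nf
    simp [pvH]
    ring_nf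

-- A's forward Horner total equals twice the weighted sum of the reversed body
theorem horner_eq_H (l : List Int) :
    l.foldl (fun t d => (t + d) * 2) 0 = 2 * pvH l.reverse := by
  induction l using List.reverseRecOn with
  | nil => simp [pvH]
  | append_singleton t d ih =>
    rw [List.foldl_append, ih]
    simp [pvH]
    ring

-- B's loop over the body chars computes A's total-plus-check congruence test
theorem altLoop_eq (nums : List Char) (check : Int) (h0 : 0 ≤ check) (h1 : check < 11) :
    pvAltLoop nums check
      = (PySem.Int.mod
          (((PySem.List.slice nums none (some (-1))).foldl
             (fun total num => (total + ((PySem.Int.ofChars? [num]).getD 0)) * 2) 0) + check) 11 == 1) := by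
  have h11 : (0:Int) < 11 := by norm_num
  unfold pvAltLoop
  simp only [PySem.Int.mod_eq_emod_of_pos h11]
  set body := PySem.List.slice nums none (some (-1)) with hb
  set f : Char → Int := fun ch => (PySem.Int.ofChars? [ch]).getD 0 with hf
  have hmap1 : (body.reverse.foldl
      (fun (st : Int × Int) ch => ((st.1 + st.2 * f ch) % 11, (st.2 * 2) % 11))
      (check % 11, 2))
      = ((body.reverse.map f).foldl
          (fun (st : Int × Int) d => ((st.1 + st.2 * d) % 11, (st.2 * 2) % 11))
          (check % 11, 2)) := by
    rw [List.foldl_map]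
  have hmap2 : body.foldl (fun total num => (total + f num) * 2) 0
      = (body.map f).foldl (fun t d => (t + d) * 2) 0 := by
    rw [List.foldl_map]
  rw [hmap1, altLoop_inv _ _ _ (Int.emod_emod_of_dvd _ (dvd_refl 11)), hmap2, horner_eq_H]
  have hck : check % 11 = check := Int.emod_eq_of_lt h0 h1
  rw [hck, ← List.map_reverse]
  have : (check + 2 * pvH (body.reverse.map f)) % 11
      = (2 * pvH (body.reverse.map f) + check) % 11 := by ring_nf
  rw [this]

-- A's check-character comparison equals the numeric congruence test: table over the ASCII domain.
def pvCheckVal (c : Char) : Option Int :=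
  if c = 'X' ∨ c = 'x' then some 10
  else if '0' ≤ c ∧ c ≤ '9' then some ((c.toNat : Int) - 48)
  else none

theorem charTable :
    ((List.range 127).all fun n => (List.range 11).all fun v =>
      (PySem.Chars.upper [Char.ofNat n] ==
        (if (v : Int) = 10 then ['X'] else PySem.Int.toChars (v : Int)))
      == (match pvCheckVal (Char.ofNat n) with
          | some k => ((v : Int) == k)
          | none => false)) = true := by decide

theorem tailEq (t : Int) (c : Char) (hc : pvDomChar c = true) :
    (PySem.Chars.upper [c] ==
      (if PySem.Int.mod (12 - PySem.Int.mod t 11) 11 = 10 then ['X']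
       else PySem.Int.toChars (PySem.Int.mod (12 - PySem.Int.mod t 11) 11)))
    = (if c = 'X' ∨ c = 'x' then PySem.Int.mod (t + 10) 11 == 1
       else if '0' ≤ c ∧ c ≤ '9' then PySem.Int.mod (t + ((c.toNat : Int) - 48)) 11 == 1
       else false) := by
  have h11 : (0:Int) < 11 := by norm_num
  simp only [PySem.Int.mod_eq_emod_of_pos h11]
  obtain ⟨m, hm, hmlt⟩ : ∃ m : Nat, ((m:Int) = (12 - t % 11) % 11 ∧ m < 11) := by
    have hv0 : 0 ≤ (12 - t % 11) % 11 := Int.emod_nonneg _ (by norm_num)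
    have hv1 : (12 - t % 11) % 11 < 11 := Int.emod_lt_of_pos _ h11
    exact ⟨((12 - t % 11) % 11).toNat, by omega, by omega⟩
  have hn : c.toNat < 127 := by
    unfold pvDomChar at hc; simp at hc; omega
  have htab := charTable
  rw [List.all_eq_true] at htab
  have h1 := htab c.toNat (by simpa using hn)
  rw [List.all_eq_true] at h1
  have h2 := h1 m (by simpa using hmlt)
  rw [beq_iff_eq, Char.ofNat_toNat, hm] at h2
  rw [h2]
  unfold pvCheckVal
  by_cases hX : c = 'X' ∨ c = 'x'
  · simp only [if_pos hX]
    rw [Bool.eq_iff_iff]; simp only [beq_iff_eq]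
    omega
  · by_cases hD : '0' ≤ c ∧ c ≤ '9'
    · simp only [if_neg hX, if_pos hD]
      have hb : 48 ≤ c.toNat ∧ c.toNat ≤ 57 := by
        obtain ⟨ha, hb⟩ := hD
        rw [Char.le_def] at ha hb
        exact ⟨UInt32.le_iff_toNat_le.mp ha, UInt32.le_iff_toNat_le.mp hb⟩
      rw [Bool.eq_iff_iff]; simp only [beq_iff_eq]
      omega
    · simp only [if_neg hX, if_neg hD]

-- ===== VERDICT (by name: the statement is the Claim_ definition above) =====
theorem check_mod_11_2_py_spec : Claim_equal_check_mod_11_2_py := by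
  intro s hdom hpre
  unfold Spec_check_mod_11_2_py check_mod_11_2_py check_mod_11_2_py_alt
  simp only [replace_dash]
  cases hg : PySem.List.pyGet? (s.toList.filter (fun c => c ≠ '-')) (-1) with
  | none => rfl
  | some c =>
    have hmem : c ∈ s.toList := List.mem_of_mem_filter (pyGet?_mem hg)
    have hcdom : pvDomChar c = true := by
      have := hdom
      unfold Dom_check_mod_11_2_py pvDomStr at this
      exact List.all_eq_true.mp this c hmem
    dsimp only
    rw [tailEq _ c hcdom]
    by_cases hX : c = 'X' ∨ c = 'x'
    · simp only [if_pos hX]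
      rw [altLoop_eq _ 10 (by norm_num) (by norm_num)]
    · simp only [if_neg hX]
      by_cases hD : '0' ≤ c ∧ c ≤ '9'
      · simp only [if_pos hD]
        have hb : 48 ≤ c.toNat ∧ c.toNat ≤ 57 := by
          obtain ⟨ha, hbb⟩ := hD
          rw [Char.le_def] at ha hbb
          exact ⟨UInt32.le_iff_toNat_le.mp ha, UInt32.le_iff_toNat_le.mp hbb⟩
        rw [altLoop_eq _ _ (by omega) (by omega)]
      · simp only [if_neg hD]
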